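-- pv_equiv track=rewrite | github.com/sahitilucky/Reliability-Aware-Tester-based-evaluation-framework | iir_methods/utils.py | join_the_content
-- ===== SOURCE A (Python) =====
-- def longest_common_substring(S, T):
--     m = len(S)
--     n = len(T)
--     counter = [[0] * (n + 1) for x in range(m + 1)]
--     longest = 0
--     lcs_set = []
--     lcs_indices = []
--     for i in range(m):
--         for j in range(n):
--             if S[i] == T[j]:
--                 c = counter[i][j] + 1
--                 counter[i + 1][j + 1] = c
--                 if c > longest:
--                     lcs_set = []
--                     lcs_indices = []
--                     longest = c
--                     lcs_indices.append((i - c + 1, i + 1, j - c + 1, j + 1))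
--                     lcs_set.append(S[i - c + 1:i + 1])
--                 elif c == longest:
--                     lcs_indices.append((i - c + 1, i + 1, j - c + 1, j + 1))
--                     lcs_set.append(S[i - c + 1:i + 1])
--     # print (lcs_set)
--     # print (lcs_indices)
--     return lcs_set, lcs_indices
--
-- def join_the_content(snippets):
--     content = snippets[0]
--     for i in range(1, len(snippets)):
--         # print ("Snippet %d: %s",i, snippets[i])
--         lcs_set, lcs_indices = longest_common_substring(content, snippets[i])
--         # print (lcs_set)
--         # print (lcs_indices)
--         if (lcs_set == []):
--             # print ("Empty lcs set")
--             # print ("Content:", content)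
--             # print ("Snippet: ", snippets[i])
--             lcs_set = ""
--             lcs_indices = (len(content), len(content), 0, 0)
--         else:
--             lcs_set, lcs_indices = lcs_set[0], lcs_indices[0]
--         joined_text = ''
--         if len(content[0:lcs_indices[0]]) > len(snippets[i][0:lcs_indices[2]]):
--             joined_text = content[0:lcs_indices[0]]
--         else:
--             joined_text = snippets[i][0:lcs_indices[2]]
--         joined_text += lcs_set
--         if len(content[lcs_indices[1]:]) > len(snippets[i][lcs_indices[3]:]):
--             joined_text += content[lcs_indices[1]:]
--         else:
--             joined_text += snippets[i][lcs_indices[3]:]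
--         content = joined_text
--         # print ("joined_content:", content)
--     # print ("Final content:" , content)
--     return content
-- ===== SOURCE B (Python) =====
-- def _best_common_run(S, T):
--     """Longest common substring via diagonal scans with O(1) extra state.
--
--     Returns (c, i, j) where c is the length of the longest common substring
--     and (i, j) are the last indices of its lexicographically-first
--     occurrence pair (end-in-S first, then end-in-T); c == 0 if none.
--     """
--     m, n = len(S), len(T)
--     best = (0, 0, 0)  # (-c, i, j) minimised lexicographically, stored as (c, i, j)
--     for d in range(-(n - 1), m) if m and n else []:
--         # diagonal d: pairs (i, j) with i - j == d
--         i = d if d > 0 else 0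
--         j = i - d
--         run = 0
--         while i < m and j < n:
--             run = run + 1 if S[i] == T[j] else 0
--             if run > 0:
--                 c, bi, bj = best
--                 if run > c or (run == c and (i < bi or (i == bi and j < bj))):
--                     best = (run, i, j)
--             i += 1
--             j += 1
--     return best
--
-- def _join2(S, T):
--     c, i, j = _best_common_run(S, T)
--     if c == 0:
--         return S + T
--     i0, j0 = i - c + 1, j - c + 1
--     pre = S[:i0] if i0 > j0 else T[:j0]
--     suf = S[i + 1:] if len(S) - i - 1 > len(T) - j - 1 else T[j + 1:]
--     return pre + S[i0:i + 1] + suf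
--
-- def join_the_content(snippets):
--     content = snippets[0]
--     for snip in snippets[1:]:
--         content = _join2(content, snip)
--     return content
-- ===== Notes on version B (the rewrite author's own statement) =====
-- stated objective: alternative
-- what changed: A builds an (m+1)x(n+1) DP table plus full candidate lists per joined snippet; B scans the two strings diagonal by diagonal keeping only a running match length and one best (length, end-in-S, end-in-T) triple with an explicit lexicographic tie-break, in O(1) extra space.
import Mathlib
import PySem

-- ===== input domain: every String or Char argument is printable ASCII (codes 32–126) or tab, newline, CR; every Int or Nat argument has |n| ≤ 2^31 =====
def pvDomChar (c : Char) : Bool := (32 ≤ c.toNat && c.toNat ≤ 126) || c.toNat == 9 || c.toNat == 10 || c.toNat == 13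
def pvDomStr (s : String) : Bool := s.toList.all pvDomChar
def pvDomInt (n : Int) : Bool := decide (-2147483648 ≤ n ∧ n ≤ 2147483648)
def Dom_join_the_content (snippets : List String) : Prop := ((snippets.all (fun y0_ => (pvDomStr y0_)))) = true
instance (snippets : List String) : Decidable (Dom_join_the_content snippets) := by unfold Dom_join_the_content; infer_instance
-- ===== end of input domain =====

-- B replaces A's (m+1)x(n+1) DP table and candidate lists by O(1)-state diagonal scans of
-- the two strings with an explicit (length, end-in-S, end-in-T) tie-break; same return value.
-- ===== PORT A =====
-- A-side helper: Python's `longest_common_substring` inner-cell body, on List Char.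
-- State = (counter, longest, lcs_set, lcs_indices); strings handled as List Char
-- (PySem.Str functions are thin wrappers over the list side).
def lcsCellA (S T : List Char)
    (st : List (List Int) × Int × List (List Char) × List (Int × Int × Int × Int))
    (i j : Int) : List (List Int) × Int × List (List Char) × List (Int × Int × Int × Int) :=
  let (counter, longest, lcs_set, lcs_indices) := st
  if PySem.List.pyGetD S i ' ' = PySem.List.pyGetD T j ' ' then
    let c := PySem.List.pyGetD (PySem.List.pyGetD counter i []) j 0 + 1
    let counter := PySem.List.pySetD counter (i + 1)
        (PySem.List.pySetD (PySem.List.pyGetD counter (i + 1) []) (j + 1) c)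
    if c > longest then
      (counter, c, [PySem.List.slice S (some (i - c + 1)) (some (i + 1))],
        [(i - c + 1, i + 1, j - c + 1, j + 1)])
    else if c = longest then
      (counter, longest, lcs_set ++ [PySem.List.slice S (some (i - c + 1)) (some (i + 1))],
        lcs_indices ++ [(i - c + 1, i + 1, j - c + 1, j + 1)])
    else (counter, longest, lcs_set, lcs_indices)
  else st

-- Python's `longest_common_substring(S, T)`.
def lcsA (S T : List Char) : List (List Char) × List (Int × Int × Int × Int) :=
  let m : Int := S.length
  let n : Int := T.length
  let counter := (PySem.List.pyRange 0 (m + 1) 1).map (fun _ => List.replicate (n + 1).toNat (0 : Int))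
  let st := (PySem.List.pyRange 0 m 1).foldl
    (fun st i => (PySem.List.pyRange 0 n 1).foldl (fun st j => lcsCellA S T st i j) st)
    (counter, 0, [], [])
  (st.2.2.1, st.2.2.2)

-- one iteration of A's joining loop (content, snippets[i] as List Char)
def join2A (content T : List Char) : List Char :=
  let p := lcsA content T
  -- Python: `if lcs_set == []` takes the sentinel, else element 0 of each list
  -- (lists are nonempty there, so headD is exact).
  let s0 := if p.1 = [] then ([] : List Char) else p.1.headD []
  let idx := if p.1 = [] then ((content.length : Int), (content.length : Int), (0 : Int), (0 : Int))
             else p.2.headD (0, 0, 0, 0)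
  let pre := if (PySem.List.slice content (some 0) (some idx.1)).length >
                (PySem.List.slice T (some 0) (some idx.2.2.1)).length
             then PySem.List.slice content (some 0) (some idx.1)
             else PySem.List.slice T (some 0) (some idx.2.2.1)
  let joined := pre ++ s0
  if (PySem.List.slice content (some idx.2.1) none).length >
     (PySem.List.slice T (some idx.2.2.2) none).length
  then joined ++ PySem.List.slice content (some idx.2.1) none
  else joined ++ PySem.List.slice T (some idx.2.2.2) none

def join_the_content (snippets : List String) : String :=
  let content := (PySem.List.pyGetD snippets 0 "").toList  -- snippets[0]; Pre_ excludes []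
  String.ofList ((PySem.List.pyRange 1 (snippets.length : Int) 1).foldl
    (fun content i => join2A content (PySem.List.pyGetD snippets i "").toList) content)

-- ===== PORT B =====
-- B-side helper: the tuple comparison `run > c or (run == c and (i < bi or (i == bi and j < bj)))`.
def betterB (t b : Nat × Nat × Nat) : Bool :=
  b.1 < t.1 || (t.1 == b.1 && (t.2.1 < b.2.1 || (t.2.1 == b.2.1 && t.2.2 < b.2.2)))

-- the `while i < m and j < n` walk down one diagonal (fuel ≥ steps remaining; guard stops it)
def diagWalk (S T : List Char) : Nat → Nat → Nat → Nat → (Nat × Nat × Nat) → (Nat × Nat × Nat)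
  | 0, _, _, _, best => best
  | fuel + 1, i, j, run, best =>
    if i < S.length ∧ j < T.length then
      let run' := if S.getD i ' ' = T.getD j ' ' then run + 1 else 0
      let best' := if 0 < run' then (if betterB (run', i, j) best then (run', i, j) else best) else best
      diagWalk S T fuel (i + 1) (j + 1) run' best'
    else best

-- Python's `_best_common_run` (i, j, run are nonnegative throughout; Nat carries the same values)
def bestCommonRun (S T : List Char) : Nat × Nat × Nat :=
  let m := S.length
  let n := T.length
  if m = 0 ∨ n = 0 then (0, 0, 0)
  else
    (PySem.List.pyRange (-(n - 1 : Int)) m 1).foldl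
      (fun best d =>
        let i : Nat := if 0 < d then d.toNat else 0
        let j : Nat := ((i : Int) - d).toNat
        diagWalk S T (m + n) i j 0 best)
      (0, 0, 0)

-- Python's `_join2`
def join2B (S T : List Char) : List Char :=
  let b := bestCommonRun S T
  if b.1 = 0 then S ++ T
  else
    let c := b.1; let i := b.2.1; let j := b.2.2
    let i0 := i + 1 - c
    let j0 := j + 1 - c
    let pre := if i0 > j0 then S.take i0 else T.take j0
    let suf := if S.length - i - 1 > T.length - j - 1 then S.drop (i + 1) else T.drop (j + 1)
    pre ++ ((S.drop i0).take c) ++ suf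

def join_the_content_alt (snippets : List String) : String :=
  String.ofList ((snippets.drop 1).foldl (fun content s => join2B content s.toList)
    (snippets.headD "").toList)

-- ===== PRECONDITION & SPEC =====
-- Pre_ excludes only the empty list, on which A raises IndexError at snippets[0].
def Pre_join_the_content (snippets : List String) : Prop := snippets ≠ []
instance (snippets : List String) : Decidable (Pre_join_the_content snippets) := by
  unfold Pre_join_the_content; infer_instance
def pvWitness_join_the_content : List String := ["abcde", "cdefg"]
def Spec_join_the_content (snippets : List String) (out : String) : Prop := out = join_the_content_alt snippets
instance (snippets : List String) (out : String) : Decidable (Spec_join_the_content snippets out) := by unfold Spec_join_the_content; infer_instance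

-- ===== CLAIM (what is proved, stated in full; the proofs are below) =====
def Claim_equal_join_the_content : Prop := ∀ (snippets : List String), Dom_join_the_content snippets → Pre_join_the_content snippets → Spec_join_the_content snippets (join_the_content snippets)

-- ===== LEMMAS AND PROOFS =====

-- length of the longest common suffix of S[0..i] and T[0..j] (the value A's DP table holds)
def runSpec (S T : List Char) : Nat → Nat → Nat
  | 0, j => if S.getD 0 ' ' = T.getD j ' ' then 1 else 0
  | i + 1, 0 => if S.getD (i + 1) ' ' = T.getD 0 ' ' then 1 else 0
  | i + 1, j + 1 => if S.getD (i + 1) ' ' = T.getD (j + 1) ' ' then runSpec S T i j + 1 else 0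

-- the unique optimum over a set of cells: maximal run, then smallest end-in-S, then end-in-T
def IsOpt (S T : List Char) (P : Nat → Nat → Prop) (b : Nat × Nat × Nat) : Prop :=
  (b = (0, 0, 0) ∧ ∀ i j, P i j → runSpec S T i j = 0) ∨
  (0 < b.1 ∧ P b.2.1 b.2.2 ∧ runSpec S T b.2.1 b.2.2 = b.1 ∧
    ∀ i j, P i j → (i, j) ≠ (b.2.1, b.2.2) → betterB (runSpec S T i j, i, j) b = false)

-- counter entry (r, c) after the row-major prefix of cells before (i, j) has been processed
def tblVal (S T : List Char) (i j : Nat) (r c : Nat) : Int :=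
  if 1 ≤ r ∧ 1 ≤ c ∧ (r - 1 < i ∨ (r - 1 = i ∧ c - 1 < j)) then runSpec S T (r - 1) (c - 1) else 0

def tblAt (S T : List Char) (i j : Nat) : List (List Int) :=
  (List.range (S.length + 1)).map (fun r => (List.range (T.length + 1)).map (tblVal S T i j r))

-- row-major prefix set of cells strictly before (i, j)
def PrefixP (n i j : Nat) : Nat → Nat → Prop := fun a c => c < n ∧ (a < i ∨ (a = i ∧ c < j))

-- A's loop state: the table, and (longest, heads of the lists) described through the optimum b
def AInv (S T : List Char) (i j : Nat)
    (st : List (List Int) × Int × List (List Char) × List (Int × Int × Int × Int)) : Prop :=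
  st.1 = tblAt S T i j ∧
  ∃ b : Nat × Nat × Nat, IsOpt S T (PrefixP T.length i j) b ∧
    st.2.1 = (b.1 : Int) ∧
    (b.1 = 0 → st.2.2.1 = [] ∧ st.2.2.2 = []) ∧
    (0 < b.1 → st.2.2.1 ≠ [] ∧
      st.2.2.1.headD [] = (S.drop (b.2.1 + 1 - b.1)).take b.1 ∧
      st.2.2.2.headD (0, 0, 0, 0) =
        (((b.2.1 + 1 - b.1 : Nat) : Int), ((b.2.1 + 1 : Nat) : Int), ((b.2.2 + 1 - b.1 : Nat) : Int), ((b.2.2 + 1 : Nat) : Int)))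

lemma headD_append_ne {α : Type} (l : List α) (x d : α) (h : l ≠ []) :
    (l ++ [x]).headD d = l.headD d := by
  cases l with
  | nil => exact absurd rfl h
  | cons a t => rfl

lemma runSpec_pos_left (S T : List Char) (i j : Nat) : runSpec S T i j ≤ i + 1 := by
  induction i generalizing j with
  | zero => cases j <;> simp [runSpec] <;> split <;> omega
  | succ i ih =>
    cases j with
    | zero => simp only [runSpec]; split <;> omega
    | succ j =>
      simp only [runSpec]; split
      · have := ih j; omega
      · omega

lemma runSpec_pos_right (S T : List Char) (i j : Nat) : runSpec S T i j ≤ j + 1 := by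
  induction i generalizing j with
  | zero => cases j <;> simp [runSpec] <;> split <;> omega
  | succ i ih =>
    cases j with
    | zero => simp only [runSpec]; split <;> omega
    | succ j =>
      simp only [runSpec]; split
      · have := ih j; omega
      · omega

lemma runSpec_step (S T : List Char) (i j : Nat) :
    runSpec S T i j = if S.getD i ' ' = T.getD j ' ' then
      ((if 0 < i ∧ 0 < j then runSpec S T (i - 1) (j - 1) else 0) + 1) else 0 := by
  match i, j with
  | 0, j => simp [runSpec]
  | i + 1, 0 => simp [runSpec]
  | i + 1, j + 1 => simp [runSpec]

lemma set_map_range {α : Type} (k t : Nat) (f : Nat → α) (v : α) (ht : t < k) :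
    ((List.range k).map f).set t v = (List.range k).map (fun x => if x = t then v else f x) := by
  apply List.ext_getElem
  · simp
  · intro i h1 h2
    simp only [List.getElem_map, List.getElem_range]
    rw [List.getElem_set]
    simp at h1
    rcases eq_or_ne i t with rfl | hne
    · simp
    · rw [if_neg (Ne.symm hne), if_neg hne]; simp
-- fix above: end with eq_comm split

lemma betterB_iff (t b : Nat × Nat × Nat) : betterB t b = true ↔
    (b.1 < t.1 ∨ (t.1 = b.1 ∧ (t.2.1 < b.2.1 ∨ (t.2.1 = b.2.1 ∧ t.2.2 < b.2.2)))) := by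
  simp [betterB]
lemma betterB_false_iff (t b : Nat × Nat × Nat) : betterB t b = false ↔
    ¬ (b.1 < t.1 ∨ (t.1 = b.1 ∧ (t.2.1 < b.2.1 ∨ (t.2.1 = b.2.1 ∧ t.2.2 < b.2.2)))) := by
  rw [← betterB_iff]; cases h : betterB t b <;> simp

lemma isOpt_congr {S T : List Char} {P Q : Nat → Nat → Prop} {b : Nat × Nat × Nat}
    (h : ∀ i j, P i j ↔ Q i j) (hb : IsOpt S T P b) : IsOpt S T Q b := by
  unfold IsOpt at *
  rcases hb with ⟨h0, hall⟩ | ⟨h1, h2, h3, h4⟩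
  · exact Or.inl ⟨h0, fun i j hq => hall i j ((h i j).2 hq)⟩
  · exact Or.inr ⟨h1, (h _ _).1 h2, h3, fun i j hq => h4 i j ((h i j).2 hq)⟩

lemma isOpt_unique {S T : List Char} {P : Nat → Nat → Prop} {b1 b2 : Nat × Nat × Nat}
    (h1 : IsOpt S T P b1) (h2 : IsOpt S T P b2) : b1 = b2 := by
  rcases h1 with ⟨rfl, hall1⟩ | ⟨hp1, hm1, hr1, hb1⟩
  · rcases h2 with ⟨rfl, _⟩ | ⟨hp2, hm2, hr2, _⟩
    · rfl
    · have := hall1 _ _ hm2; omega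
  · rcases h2 with ⟨rfl, hall2⟩ | ⟨hp2, hm2, hr2, hb2⟩
    · have := hall2 _ _ hm1; omega
    · by_cases hc : (b1.2.1, b1.2.2) = (b2.2.1, b2.2.2)
      · obtain ⟨e1, e2⟩ := Prod.mk.injEq .. ▸ hc
        have : b1.1 = b2.1 := by rw [← hr1, ← hr2, e1, e2]
        obtain ⟨x1, y1, z1⟩ := b1; obtain ⟨x2, y2, z2⟩ := b2
        simp_all
      · have f1 := hb2 _ _ hm1 (by simpa using hc)
        have f2 := hb1 _ _ hm2 (by
          intro h; apply hc; rw [Prod.mk.injEq] at h ⊢; exact ⟨h.1.symm, h.2.symm⟩)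
        rw [hr1] at f1; rw [hr2] at f2
        rw [betterB_false_iff] at f1 f2
        simp at f1 f2
        obtain ⟨x1, y1, z1⟩ := b1; obtain ⟨x2, y2, z2⟩ := b2
        simp_all
        omega

lemma isOpt_step {S T : List Char} {P : Nat → Nat → Prop} {b : Nat × Nat × Nat} (i j : Nat)
    (hb : IsOpt S T P b) :
    IsOpt S T (fun a c => P a c ∨ (a = i ∧ c = j))
      (if 0 < runSpec S T i j then
        (if betterB (runSpec S T i j, i, j) b then (runSpec S T i j, i, j) else b)
       else b) := by
  set r := runSpec S T i j with hr
  by_cases h0 : 0 < r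
  · rw [if_pos h0]
    by_cases hbet : betterB (r, i, j) b = true
    · rw [if_pos hbet]
      right
      refine ⟨h0, Or.inr ⟨rfl, rfl⟩, hr.symm, ?_⟩
      intro a c hac hne
      rcases hac with hP | ⟨rfl, rfl⟩
      · -- a cell of P: it lost to b (or b was initial (0,0,0)), and (r,i,j) beats b
        rcases hb with ⟨rfl, hall⟩ | ⟨hp1, hm1, hr1, hb1⟩
        · -- all P runs are 0; r > 0 wins
          have := hall _ _ hP
          rw [betterB_false_iff]; simp; omega
        · by_cases hbc : (a, c) = (b.2.1, b.2.2)
          · -- the cell IS b's cell: show betterB b (r,i,j) false from asymmetry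
            rw [Prod.mk.injEq] at hbc
            obtain ⟨rfl, rfl⟩ := hbc
            rw [hr1]
            rw [betterB_iff] at hbet
            rw [betterB_false_iff]
            simp at hbet ⊢
            omega
          · have f := hb1 _ _ hP hbc
            rw [betterB_iff] at hbet
            rw [betterB_false_iff] at f ⊢
            simp at hbet f ⊢
            omega
      · simp at hne
    · rw [if_neg (by simpa using hbet)]
      rw [Bool.not_eq_true] at hbet
      rcases hb with ⟨rfl, hall⟩ | ⟨hp1, hm1, hr1, hb1⟩
      · -- b = (0,0,0) but r > 0 would beat it: contradiction
        rw [betterB_false_iff] at hbet; simp at hbet; omega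
      · right
        refine ⟨hp1, Or.inl hm1, hr1, ?_⟩
        intro a c hac hne
        rcases hac with hP | ⟨rfl, rfl⟩
        · exact hb1 _ _ hP hne
        · rw [← hr]; exact hbet
  · rw [if_neg h0]
    rcases hb with ⟨rfl, hall⟩ | ⟨hp1, hm1, hr1, hb1⟩
    · left
      refine ⟨rfl, ?_⟩
      intro a c hac
      rcases hac with hP | ⟨rfl, rfl⟩
      · exact hall _ _ hP
      · omega
    · right
      refine ⟨hp1, Or.inl hm1, hr1, ?_⟩
      intro a c hac hne
      rcases hac with hP | ⟨rfl, rfl⟩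
      · exact hb1 _ _ hP hne
      · rw [betterB_false_iff]; simp; omega

lemma diagWalk_opt (S T : List Char) (fuel : Nat) :
    ∀ (i j run : Nat) (best : Nat × Nat × Nat) (P : Nat → Nat → Prop),
    (min (S.length - i) (T.length - j)) ≤ fuel →
    (run = if 0 < i ∧ 0 < j then runSpec S T (i - 1) (j - 1) else 0) →
    IsOpt S T P best →
    IsOpt S T (fun a c => P a c ∨ (a < S.length ∧ c < T.length ∧ i ≤ a ∧ j ≤ c ∧ a - i = c - j))
      (diagWalk S T fuel i j run best) := by
  induction fuel with
  | zero =>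
    intro i j run best P hfuel hrun hb
    simp only [diagWalk]
    refine isOpt_congr (fun a c => ?_) hb
    constructor
    · exact Or.inl
    · rintro (h | h) 
      · exact h
      · omega
  | succ fuel ih =>
    intro i j run best P hfuel hrun hb
    simp only [diagWalk]
    by_cases hg : i < S.length ∧ j < T.length
    · rw [if_pos hg]
      have hrun' : (if S.getD i ' ' = T.getD j ' ' then run + 1 else 0) = runSpec S T i j := by
        rw [runSpec_step S T i j, hrun]
      rw [hrun']
      have hstep := isOpt_step (S := S) (T := T) i j hb
      have := ih (i + 1) (j + 1) (runSpec S T i j) _ _ (by omega) (by simp) hstep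
      refine isOpt_congr (fun a c => ?_) this
      constructor
      · rintro ((h | ⟨rfl, rfl⟩) | h)
        · exact Or.inl h
        · exact Or.inr ⟨hg.1, hg.2, le_refl _, le_refl _, by omega⟩
        · exact Or.inr (by omega)
      · rintro (h | h)
        · exact Or.inl (Or.inl h)
        · by_cases hij : a = i ∧ c = j
          · exact Or.inl (Or.inr hij)
          · exact Or.inr (by omega)
    · rw [if_neg hg]
      refine isOpt_congr (fun a c => ?_) hb
      constructor
      · exact Or.inl
      · rintro (h | h)
        · exact h
        · omega

lemma bestCommonRun_opt (S T : List Char) :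
    IsOpt S T (fun a c => a < S.length ∧ c < T.length) (bestCommonRun S T) := by
  unfold bestCommonRun
  by_cases h0 : S.length = 0 ∨ T.length = 0
  · rw [if_pos h0]
    exact Or.inl ⟨rfl, fun a c h => by omega⟩
  · rw [if_neg h0]
    have hm : 0 < S.length := by omega
    have hn : 0 < T.length := by omega
    have main : ∀ t : Nat,
        IsOpt S T (fun a c => a < S.length ∧ c < T.length ∧ (a : Int) - c < -(T.length - 1 : Int) + t)
          ((PySem.List.pyRange (-(T.length - 1 : Int)) (-(T.length - 1 : Int) + t) 1).foldl
            (fun best d =>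
              let i : Nat := if 0 < d then d.toNat else 0
              let j : Nat := ((i : Int) - d).toNat
              diagWalk S T (S.length + T.length) i j 0 best)
            (0, 0, 0)) := by
      intro t
      induction t with
      | zero =>
        rw [PySem.List.pyRange_one_eq_nil (by omega)]
        exact Or.inl ⟨rfl, fun a c h => by omega⟩
      | succ t ih =>
        have : (-(T.length - 1 : Int) + (t + 1 : Nat)) = (-(T.length - 1 : Int) + t) + 1 := by
          push_cast; ring
        rw [this, PySem.List.pyRange_one_succ_right (by omega), List.foldl_append,
          List.foldl_cons, List.foldl_nil]
        set d : Int := -(T.length - 1 : Int) + t with hd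
        have hstep := diagWalk_opt S T (S.length + T.length)
          (if 0 < d then d.toNat else 0) (((if 0 < d then d.toNat else 0 : Nat) : Int) - d).toNat
          0 _ _ (by omega)
          (by
            by_cases hdp : 0 < d
            · simp [hdp]; intro h; exact absurd hdp (by omega)
            · simp [hdp])
          ih
        refine isOpt_congr (fun a c => ?_) hstep
        have hij : ((if 0 < d then d.toNat else 0 : Nat) : Int) -
            ((((if 0 < d then d.toNat else 0 : Nat) : Int) - d).toNat : Int) = d ∧
            ((if 0 < d then d.toNat else 0 : Nat) = 0 ∨
             ((((if 0 < d then d.toNat else 0 : Nat) : Int) - d).toNat) = 0) := by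
          by_cases hdp : 0 < d
          · rw [if_pos hdp]
            constructor
            · omega
            · right; omega
          · rw [if_neg hdp]
            constructor
            · omega
            · left; rfl
        obtain ⟨e1, e2⟩ := hij
        constructor
        · rintro (⟨h1, h2, h3⟩ | ⟨h1, h2, h3, h4, h5⟩)
          · refine ⟨h1, h2, by omega⟩
          · refine ⟨h1, h2, by omega⟩
        · rintro ⟨h1, h2, h3⟩
          by_cases hlt : (a : Int) - c < d
          · exact Or.inl ⟨h1, h2, hlt⟩
          · right
            refine ⟨h1, h2, ?_, ?_, ?_⟩ <;> omega
    have := main (S.length + T.length - 1)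
    have he : (-(T.length - 1 : Int) + (S.length + T.length - 1 : Nat)) = (S.length : Int) := by
      omega
    rw [he] at this
    refine isOpt_congr (fun a c => ?_) this
    constructor
    · rintro ⟨h1, h2, _⟩; exact ⟨h1, h2⟩
    · rintro ⟨h1, h2⟩; exact ⟨h1, h2, by omega⟩

lemma tblAt_row (S T : List Char) (i j r : Nat) (hr : r < S.length + 1) :
    PySem.List.pyGetD (tblAt S T i j) (r : Int) [] = (List.range (T.length + 1)).map (tblVal S T i j r) := by
  rw [PySem.List.pyGetD_natCast]
  unfold tblAt
  rw [List.getD_eq_getElem _ _ (by simpa using hr)]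
  simp

lemma tblAt_read (S T : List Char) (i j r c : Nat) (hr : r < S.length + 1) (hc : c < T.length + 1) :
    PySem.List.pyGetD (PySem.List.pyGetD (tblAt S T i j) (r : Int) []) (c : Int) 0 = tblVal S T i j r c := by
  rw [tblAt_row S T i j r hr, PySem.List.pyGetD_natCast]
  rw [List.getD_eq_getElem _ _ (by simpa using hc)]
  simp

lemma tblAt_congr (S T : List Char) (i j i' j' : Nat)
    (h : ∀ r c, r < S.length + 1 → c < T.length + 1 → tblVal S T i j r c = tblVal S T i' j' r c) :
    tblAt S T i j = tblAt S T i' j' := by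
  unfold tblAt
  refine List.map_congr_left (fun r hr => ?_)
  refine List.map_congr_left (fun c hc => ?_)
  exact h r c (List.mem_range.1 hr) (List.mem_range.1 hc)

-- writing cell (i+1, j+1) := counter[i][j] + 1 turns prefix (i, j) into prefix (i, j+1)
lemma tblAt_write (S T : List Char) (i j : Nat) (hi : i < S.length) (hj : j < T.length)
    (hch : S.getD i ' ' = T.getD j ' ') :
    PySem.List.pySetD (tblAt S T i j) ((i : Int) + 1)
      (PySem.List.pySetD (PySem.List.pyGetD (tblAt S T i j) ((i : Int) + 1) []) ((j : Int) + 1)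
        ((tblVal S T i j i j) + 1)) = tblAt S T i (j + 1) := by
  have e1 : ((i : Int) + 1) = ((i + 1 : Nat) : Int) := by push_cast; ring
  have e2 : ((j : Int) + 1) = ((j + 1 : Nat) : Int) := by push_cast; ring
  rw [e1, e2, tblAt_row S T i j (i+1) (by omega), PySem.List.pySetD_natCast, PySem.List.pySetD_natCast]
  rw [set_map_range _ _ _ _ (by omega)]
  conv_lhs => rw [tblAt]
  rw [set_map_range _ _ _ _ (by omega)]
  unfold tblAt
  refine List.map_congr_left (fun r hr => ?_)
  rw [List.mem_range] at hr
  by_cases hri : r = i + 1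
  · subst hri
    rw [if_pos rfl]
    refine List.map_congr_left (fun c hc => ?_)
    rw [List.mem_range] at hc
    by_cases hcj : c = j + 1
    · subst hcj
      rw [if_pos rfl]
      have hrun : runSpec S T i j = (if 0 < i ∧ 0 < j then runSpec S T (i - 1) (j - 1) else 0) + 1 := by
        rw [runSpec_step S T i j, if_pos hch]
      unfold tblVal
      split_ifs <;> push_cast <;> rw [hrun] at * <;> split_ifs at * <;> omega
    · rw [if_neg hcj]
      unfold tblVal
      split_ifs <;> first | rfl | omega
  · rw [if_neg hri]
    refine List.map_congr_left (fun c hc => ?_)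
    unfold tblVal
    split_ifs <;> first | rfl | omega

lemma lcsCellA_step (S T : List Char) (i j : Nat) (hi : i < S.length) (hj : j < T.length)
    (st : List (List Int) × Int × List (List Char) × List (Int × Int × Int × Int))
    (h : AInv S T i j st) : AInv S T i (j + 1) (lcsCellA S T st i j) := by
  obtain ⟨tbl, L, sets, idxs⟩ := st
  obtain ⟨htbl, b, hopt, hL, h0, hpos⟩ := h
  simp only at htbl hL h0 hpos
  subst htbl hL
  have hPiff : ∀ a c : Nat, (PrefixP T.length i j a c ∨ (a = i ∧ c = j)) ↔ PrefixP T.length i (j + 1) a c := by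
    intro a c; unfold PrefixP; omega
  simp only [lcsCellA, PySem.List.pyGetD_natCast]
  rw [List.getD_eq_getElem _ _ hi, List.getD_eq_getElem _ _ hj]
  by_cases hch : S[i] = T[j]
  · rw [if_pos hch]
    have hch' : S.getD i ' ' = T.getD j ' ' := by
      rw [List.getD_eq_getElem _ _ hi, List.getD_eq_getElem _ _ hj]; exact hch
    have hread : ((tblAt S T i j).getD i []).getD j 0 = tblVal S T i j i j := by
      have := tblAt_read S T i j i j (by omega) (by omega)
      simpa [PySem.List.pyGetD_natCast] using this
    have hr1 : 0 < runSpec S T i j := by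
      rw [runSpec_step S T i j, if_pos hch']; omega
    have hrl : runSpec S T i j ≤ i + 1 := runSpec_pos_left S T i j
    have hrr : runSpec S T i j ≤ j + 1 := runSpec_pos_right S T i j
    have hcv : (tblVal S T i j i j) + 1 = ((runSpec S T i j : Nat) : Int) := by
      rw [runSpec_step S T i j, if_pos hch']
      unfold tblVal
      split_ifs <;> push_cast <;> omega
    rw [hread, hcv]
    have hw : PySem.List.pySetD (tblAt S T i j) ((i : Int) + 1)
        (PySem.List.pySetD (PySem.List.pyGetD (tblAt S T i j) ((i : Int) + 1) []) ((j : Int) + 1)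
          ((runSpec S T i j : Nat) : Int)) = tblAt S T i (j + 1) := by
      rw [← hcv]; exact tblAt_write S T i j hi hj hch'
    rw [hw]
    have hstep := isOpt_step (S := S) (T := T) i j hopt
    rw [if_pos hr1] at hstep
    have hslice : PySem.List.slice S (some ((i : Int) - ((runSpec S T i j : Nat) : Int) + 1)) (some ((i : Int) + 1))
        = (S.drop (i + 1 - runSpec S T i j)).take (runSpec S T i j) := by
      have e1 : ((i : Int) - ((runSpec S T i j : Nat) : Int) + 1) = ((i + 1 - runSpec S T i j : Nat) : Int) := by
        omega
      have e2 : ((i : Int) + 1) = ((i + 1 : Nat) : Int) := by push_cast; ring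
      rw [e1, e2, PySem.List.slice_natCast]
      congr 1
      omega
    by_cases hgt : ((runSpec S T i j : Nat) : Int) > (b.1 : Int)
    · rw [if_pos hgt]
      have hbet : betterB (runSpec S T i j, i, j) b = true := by
        rw [betterB_iff]; left; simpa using by exact_mod_cast hgt
      rw [if_pos hbet] at hstep
      refine ⟨rfl, (runSpec S T i j, i, j), isOpt_congr hPiff hstep, rfl, by omega, fun _ => ?_⟩
      refine ⟨by simp, ?_, ?_⟩
      · simpa using hslice
      · simp only [List.headD_cons]
        have e1 : ((i : Int) - ((runSpec S T i j : Nat) : Int) + 1) = ((i + 1 - runSpec S T i j : Nat) : Int) := by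
          omega
        have e2 : ((i : Int) + 1) = ((i + 1 : Nat) : Int) := by push_cast; ring
        have e3 : ((j : Int) - ((runSpec S T i j : Nat) : Int) + 1) = ((j + 1 - runSpec S T i j : Nat) : Int) := by
          omega
        have e4 : ((j : Int) + 1) = ((j + 1 : Nat) : Int) := by push_cast; ring
        rw [e1, e2, e3, e4]
    · rw [if_neg hgt]
      have hble : runSpec S T i j ≤ b.1 := by exact_mod_cast not_lt.1 hgt
      have hb1 : 0 < b.1 := by omega
      obtain ⟨_, hbmem, hbrun, _⟩ := hopt.resolve_left (by
        rintro ⟨rfl, _⟩; simp at hb1)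
      have hblex : b.2.1 < i ∨ (b.2.1 = i ∧ b.2.2 < j) := hbmem.2
      have hbet : betterB (runSpec S T i j, i, j) b = false := by
        rw [betterB_false_iff]
        simp only [not_or]
        constructor
        · omega
        · rintro ⟨_, h2⟩
          omega
      rw [if_neg (ne_true_of_eq_false hbet)] at hstep
      obtain ⟨hne, hhead, hidx⟩ := hpos hb1
      by_cases heq : ((runSpec S T i j : Nat) : Int) = (b.1 : Int)
      · rw [if_pos heq]
        have hreq : runSpec S T i j = b.1 := by exact_mod_cast heq
        have hidxne : idxs ≠ [] := by
          intro hnil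
          rw [hnil] at hidx
          simp at hidx
          omega
        refine ⟨rfl, b, isOpt_congr hPiff hstep, rfl, by omega, fun _ => ?_⟩
        refine ⟨by simp [hne], ?_, ?_⟩
        · rw [headD_append_ne _ _ _ hne]; exact hhead
        · rw [headD_append_ne _ _ _ hidxne]; exact hidx
      · rw [if_neg heq]
        exact ⟨rfl, b, isOpt_congr hPiff hstep, rfl, by omega, fun _ => ⟨hne, hhead, hidx⟩⟩
  · rw [if_neg hch]
    have hr0 : runSpec S T i j = 0 := by
      rw [runSpec_step S T i j, if_neg (by
        rw [List.getD_eq_getElem _ _ hi, List.getD_eq_getElem _ _ hj]; exact hch)]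
    have htb : tblAt S T i j = tblAt S T i (j + 1) := by
      refine tblAt_congr S T i j i (j+1) (fun r c hr hc => ?_)
      unfold tblVal
      split_ifs with hA hB
      · rfl
      · exfalso; omega
      · have hrc : r - 1 = i ∧ c - 1 = j := by omega
        rw [hrc.1, hrc.2, hr0]; simp
      · rfl
    have hstep := isOpt_step (S := S) (T := T) i j hopt
    rw [if_neg (by omega)] at hstep
    exact ⟨htb, b, isOpt_congr hPiff hstep, rfl, h0, hpos⟩

lemma AInv_congr_idx (S T : List Char) (i j i' j' : Nat)
    (hP : ∀ a c, PrefixP T.length i j a c ↔ PrefixP T.length i' j' a c)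
    (hT : tblAt S T i j = tblAt S T i' j')
    (st : List (List Int) × Int × List (List Char) × List (Int × Int × Int × Int))
    (h : AInv S T i j st) : AInv S T i' j' st := by
  obtain ⟨h1, b, h2, h3, h4, h5⟩ := h
  exact ⟨hT ▸ h1, b, isOpt_congr hP h2, h3, h4, h5⟩

lemma tblVal_zero (S T : List Char) (r c : Nat) : tblVal S T 0 0 r c = 0 := by
  unfold tblVal; split_ifs <;> omega

lemma lcsA_row (S T : List Char) (i : Nat) (hi : i < S.length)
    (st : List (List Int) × Int × List (List Char) × List (Int × Int × Int × Int))
    (h : AInv S T i 0 st) :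
    AInv S T (i + 1) 0
      ((PySem.List.pyRange 0 (T.length : Int) 1).foldl (fun st j => lcsCellA S T st i j) st) := by
  have main : ∀ u : Nat, u ≤ T.length →
      AInv S T i u ((PySem.List.pyRange 0 (u : Int) 1).foldl (fun st j => lcsCellA S T st (i : Int) j) st) := by
    intro u hu
    induction u with
    | zero => simp only [Nat.cast_zero]; rw [PySem.List.pyRange_one_eq_nil le_rfl]; simpa using h
    | succ u ih =>
      have e : ((u + 1 : Nat) : Int) = (u : Int) + 1 := by push_cast; ring
      rw [e, PySem.List.pyRange_one_succ_right (by omega), List.foldl_append,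
        List.foldl_cons, List.foldl_nil]
      exact lcsCellA_step S T i u hi (by omega) _ (ih (by omega))
  have hend := main T.length le_rfl
  refine AInv_congr_idx S T i T.length (i + 1) 0 ?_ ?_ _ hend
  · intro a c; unfold PrefixP; omega
  · refine tblAt_congr S T i T.length (i + 1) 0 (fun r c hr hc => ?_)
    unfold tblVal
    split_ifs <;> first | rfl | omega

lemma lcsA_final (S T : List Char) :
    ∃ st, (lcsA S T).1 = st.2.2.1 ∧ (lcsA S T).2 = st.2.2.2 ∧ AInv S T S.length 0 st := by
  unfold lcsA
  simp only
  refine ⟨_, rfl, rfl, ?_⟩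
  have hinit : AInv S T 0 0
      ((PySem.List.pyRange 0 ((S.length : Int) + 1) 1).map (fun _ => List.replicate ((T.length : Int) + 1).toNat (0 : Int)), 0, [], []) := by
    constructor
    · simp only
      rw [PySem.List.pyRange_one]
      simp only [Int.sub_zero, List.map_map]
      unfold tblAt
      have e : ((S.length : Int) + 1).toNat = S.length + 1 := by omega
      rw [e]
      refine List.map_congr_left (fun r _ => ?_)
      simp only [Function.comp]
      have e2 : ((T.length : Int) + 1).toNat = T.length + 1 := by omega
      rw [e2]
      refine (List.eq_replicate_iff.2 ⟨by simp, ?_⟩).symm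
      intro b hb
      simp only [List.mem_map, List.mem_range] at hb
      obtain ⟨c, _, rfl⟩ := hb
      exact tblVal_zero S T r c
    · refine ⟨(0, 0, 0), Or.inl ⟨rfl, fun a c h => ?_⟩, rfl, fun _ => ⟨rfl, rfl⟩, fun h => by omega⟩
      unfold PrefixP at h
      omega
  have main : ∀ t : Nat, t ≤ S.length →
      AInv S T t 0 ((PySem.List.pyRange 0 (t : Int) 1).foldl
        (fun st i => (PySem.List.pyRange 0 (T.length : Int) 1).foldl (fun st j => lcsCellA S T st i j) st)
        ((PySem.List.pyRange 0 ((S.length : Int) + 1) 1).map (fun _ => List.replicate ((T.length : Int) + 1).toNat (0 : Int)), 0, [], [])) := by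
    intro t ht
    induction t with
    | zero => simp only [Nat.cast_zero]; rw [PySem.List.pyRange_one_eq_nil le_rfl]; simpa using hinit
    | succ t ih =>
      have e : ((t + 1 : Nat) : Int) = (t : Int) + 1 := by push_cast; ring
      rw [e, PySem.List.pyRange_one_succ_right (a := 0) (b := (t : Int)) (by omega), List.foldl_append,
        List.foldl_cons, List.foldl_nil]
      exact lcsA_row S T t (by omega) _ (ih (by omega))
  exact main S.length le_rfl

lemma lcsA_char (S T : List Char) :
    ∃ b : Nat × Nat × Nat, IsOpt S T (fun a c => a < S.length ∧ c < T.length) b ∧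
      (b.1 = 0 → (lcsA S T).1 = [] ∧ (lcsA S T).2 = []) ∧
      (0 < b.1 → (lcsA S T).1 ≠ [] ∧
        (lcsA S T).1.headD [] = (S.drop (b.2.1 + 1 - b.1)).take b.1 ∧
        (lcsA S T).2.headD (0, 0, 0, 0) =
          (((b.2.1 + 1 - b.1 : Nat) : Int), ((b.2.1 + 1 : Nat) : Int), ((b.2.2 + 1 - b.1 : Nat) : Int), ((b.2.2 + 1 : Nat) : Int))) := by
  obtain ⟨st, e1, e2, hA⟩ := lcsA_final S T
  obtain ⟨_, b, hopt, _, h0, hpos⟩ := hA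
  refine ⟨b, isOpt_congr (fun a c => ?_) hopt, ?_, ?_⟩
  · unfold PrefixP; omega
  · intro hb; rw [e1, e2]; exact h0 hb
  · intro hb
    obtain ⟨hne, hh, hi⟩ := hpos hb
    exact ⟨by rw [e1]; exact hne, by rw [e1]; exact hh, by rw [e2]; exact hi⟩

lemma join2_eq (S T : List Char) : join2A S T = join2B S T := by
  obtain ⟨b, hoptA, h0, hpos⟩ := lcsA_char S T
  have hbb : bestCommonRun S T = b := isOpt_unique (bestCommonRun_opt S T) hoptA
  simp only [join2A, join2B, hbb]
  by_cases hb0 : b.1 = 0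
  · rw [if_pos hb0]
    rw [if_pos (h0 hb0).1, if_pos (h0 hb0).1]
    simp only [PySem.List.slice_zero_start]
    have c1 : PySem.List.slice S none (some (S.length : Int)) = S := by
      rw [PySem.List.slice_to_natCast]; simp
    have c2 : PySem.List.slice T none (some (0 : Int)) = [] := by
      rw [show (0 : Int) = ((0 : Nat) : Int) from rfl, PySem.List.slice_to_natCast]; simp
    have c3 : PySem.List.slice S (some (S.length : Int)) none = [] := by
      rw [PySem.List.slice_from_natCast]; simp
    have c4 : PySem.List.slice T none none = T := PySem.List.slice_none_none T
    rw [c1, c2, c3, c4]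
    have ho : ¬ (([] : List Char).length > T.length) := by simp
    rw [if_neg ho]
    by_cases hm : S.length > ([] : List Char).length
    · rw [if_pos hm]; simp
    · rw [if_neg hm]
      have hS : S = [] := List.length_eq_zero_iff.1 (by simpa using hm)
      simp [hS]
  · rw [if_neg hb0]
    have hbpos : 0 < b.1 := by omega
    obtain ⟨hne, hh, hi⟩ := hpos hbpos
    rw [if_neg hne, if_neg hne, hh, hi]
    obtain ⟨_, ⟨hiS, hjT⟩, hrun, _⟩ := hoptA.resolve_left (by rintro ⟨rfl, _⟩; simp at hbpos)
    have hrl : b.1 ≤ b.2.1 + 1 := hrun ▸ runSpec_pos_left S T b.2.1 b.2.2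
    have hrr : b.1 ≤ b.2.2 + 1 := hrun ▸ runSpec_pos_right S T b.2.1 b.2.2
    simp only [PySem.List.slice_zero_start]
    rw [PySem.List.slice_to_natCast, PySem.List.slice_to_natCast,
      PySem.List.slice_from_natCast, PySem.List.slice_from_natCast]
    simp only [List.length_take, List.length_drop]
    have e1 : min (b.2.1 + 1 - b.1) S.length = b.2.1 + 1 - b.1 := by omega
    have e2 : min (b.2.2 + 1 - b.1) T.length = b.2.2 + 1 - b.1 := by omega
    rw [e1, e2]
    have e3 : S.length - (b.2.1 + 1) = S.length - b.2.1 - 1 := by omega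
    have e4 : T.length - (b.2.2 + 1) = T.length - b.2.2 - 1 := by omega
    rw [e3, e4]
    split_ifs <;> rfl

-- ===== VERDICT (by name: the statement is the Claim_ definition above) =====
theorem join_the_content_spec : Claim_equal_join_the_content := by
  intro snippets _hdom hpre
  unfold Pre_join_the_content at hpre
  unfold Spec_join_the_content join_the_content join_the_content_alt
  obtain ⟨s, rest, rfl⟩ : ∃ s rest, snippets = s :: rest := by
    cases snippets with
    | nil => exact absurd rfl hpre
    | cons s rest => exact ⟨s, rest, rfl⟩
  simp only [PySem.List.pyGetD_zero_cons, List.headD_cons, List.drop_one, List.tail_cons]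
  rw [PySem.List.foldl_pyRange_pyGetD' (s :: rest) ""
    (fun (content : List Char) (x : String) => join2A content x.toList) s.toList (a := 1) (by omega)]
  simp only [Int.toNat_one, List.drop_one, List.tail_cons]
  have hfun : (fun (content : List Char) (x : String) => join2A content x.toList)
      = fun (content : List Char) (x : String) => join2B content x.toList := by
    funext content x
    exact join2_eq content x.toList
  rw [hfun]
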